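-- pv_equiv track=rewrite | github.com/lefoulkrod/computron_9000 | tools/browser/select.py | _find_option_index
-- ===== SOURCE A (Python) =====
-- def _find_option_index(options: list[str], value: str) -> int:
--     """Find the index of an option value, with fuzzy matching fallback.
--
--     Tries exact match first, then falls back to case-insensitive and
--     whitespace-normalized matching.  Some sites add extra whitespace
--     or formatting to option text that doesn't match the displayed value.
--
--     Args:
--         options: List of option text strings.
--         value: The desired option text to find.
--
--     Returns:
--         The index of the matching option.
--
--     Raises:
--         ValueError: If no matching option is found.
--     """
--     # Exact match
--     try:
--         return options.index(value)
--     except ValueError: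
--         pass
--
--     # Case-insensitive and whitespace-normalized match
--     normalized = value.strip().lower()
--     for i, opt in enumerate(options):
--         if opt.strip().lower() == normalized:
--             return i
--
--     raise ValueError(f"Option '{value}' not found in dropdown")
-- ===== SOURCE B (Python) =====
-- def _find_option_index(options: list[str], value: str) -> int:
--     """Single pass: exact match returns immediately; first fuzzy match is
--     remembered and used only if no exact match exists anywhere."""
--     normalized = value.strip().lower()
--     fuzzy_index = None
--     for i, opt in enumerate(options):
--         if opt == value:
--             return i
--         if fuzzy_index is None and opt.strip().lower() == normalized:
--             fuzzy_index = i
--     if fuzzy_index is not None: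
--         return fuzzy_index
--     raise ValueError(f"Option '{value}' not found in dropdown")
-- ===== Notes on version B (the rewrite author's own statement) =====
-- stated objective: simpler
-- what changed: Merged A's exact-match pass (options.index) and the separate fuzzy pass into one enumerate loop that returns immediately on an exact match and remembers the first fuzzy candidate.
import Mathlib
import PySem

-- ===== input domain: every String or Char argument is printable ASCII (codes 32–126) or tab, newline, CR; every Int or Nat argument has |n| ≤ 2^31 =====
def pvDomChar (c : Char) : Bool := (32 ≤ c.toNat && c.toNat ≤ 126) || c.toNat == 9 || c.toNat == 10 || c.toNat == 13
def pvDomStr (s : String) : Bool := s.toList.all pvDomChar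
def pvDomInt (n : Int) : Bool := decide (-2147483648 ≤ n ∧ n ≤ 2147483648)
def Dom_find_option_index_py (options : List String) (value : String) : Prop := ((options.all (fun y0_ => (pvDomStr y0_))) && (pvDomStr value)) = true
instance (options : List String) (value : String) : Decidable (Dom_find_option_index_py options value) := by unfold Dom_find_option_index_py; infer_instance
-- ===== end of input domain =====

-- B merges A's two sequential passes (options.index, then a fuzzy scan) into one
-- enumerate loop that returns on exact match and remembers the first fuzzy candidate (objective: simpler).

-- ===== PORT A =====
-- the `for i, opt in enumerate(options)` fuzzy loop of A; 0 is never reached under Pre_ (ValueError)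
def pvFuzzyLoopA (normalized : String) : List String → Int → Int
  | [], _ => 0
  | opt :: rest, i =>
    if PySem.Str.lower (PySem.Str.strip opt) == normalized then i
    else pvFuzzyLoopA normalized rest (i + 1)

def find_option_index_py (options : List String) (value : String) : Int :=
  match PySem.List.index? options value with
  | some i => (i : Int)
  | none =>
    let normalized := PySem.Str.lower (PySem.Str.strip value)
    pvFuzzyLoopA normalized options 0

-- ===== PORT B =====
-- single pass with a remembered fuzzy index; 0 is never reached under Pre_ (ValueError)
def pvLoopB (value normalized : String) : List String → Int → Option Int → Int
  | [], _, fuzzy => match fuzzy with | some j => j | none => 0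
  | opt :: rest, i, fuzzy =>
    if opt == value then i
    else
      pvLoopB value normalized rest (i + 1)
        (if fuzzy.isNone && (PySem.Str.lower (PySem.Str.strip opt) == normalized) then some i else fuzzy)

def find_option_index_py_alt (options : List String) (value : String) : Int :=
  let normalized := PySem.Str.lower (PySem.Str.strip value)
  pvLoopB value normalized options 0 none

-- ===== PRECONDITION & SPEC =====
-- Pre_ excludes exactly the inputs where A raises ValueError (no exact and no fuzzy match)
def Pre_find_option_index_py (options : List String) (value : String) : Prop :=
  value ∈ options ∨
    (options.any (fun opt =>
      PySem.Str.lower (PySem.Str.strip opt) == PySem.Str.lower (PySem.Str.strip value))) = true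
instance (options : List String) (value : String) : Decidable (Pre_find_option_index_py options value) := by
  unfold Pre_find_option_index_py; infer_instance

def pvWitness_find_option_index_py : List String × String := (["Red ", "blue"], "red")

def Spec_find_option_index_py (options : List String) (value : String) (out : Int) : Prop := out = find_option_index_py_alt options value
instance (options : List String) (value : String) (out : Int) : Decidable (Spec_find_option_index_py options value out) := by unfold Spec_find_option_index_py; infer_instance

-- ===== CLAIM (what is proved, stated in full; the proofs are below) =====
def Claim_equal_find_option_index_py : Prop := ∀ (options : List String) (value : String), Dom_find_option_index_py options value → Pre_find_option_index_py options value → Spec_find_option_index_py options value (find_option_index_py options value)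

-- ===== LEMMAS AND PROOFS =====

-- B's loop, characterised by A's two-pass result.
theorem pvLoopB_eq (value normalized : String) (opts : List String) (i : Int) (fz : Option Int) :
    pvLoopB value normalized opts i fz =
      match PySem.List.index? opts value with
      | some j => i + (j : Int)
      | none =>
        match fz with
        | some j => j
        | none => pvFuzzyLoopA normalized opts i := by
  induction opts generalizing i fz with
  | nil => simp [pvLoopB, pvFuzzyLoopA]
  | cons o rest ih =>
    by_cases h : o = value
    · subst h
      rw [PySem.List.index?_cons_self]
      simp [pvLoopB]
    · have hne : (o == value) = false := by simp [h]
      rw [PySem.List.index?_cons_of_ne rest h]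
      simp only [pvLoopB, hne, Bool.false_eq_true, if_false, ih]
      cases hidx : PySem.List.index? rest value with
      | some j => simp; ring
      | none =>
        simp only [Option.map_none]
        cases fz with
        | some j => simp
        | none =>
          by_cases hf : (PySem.Str.lower (PySem.Str.strip o) == normalized) = true
          · simp [pvFuzzyLoopA, hf]
          · simp only [Bool.not_eq_true] at hf
            simp [pvFuzzyLoopA, hf]

-- ===== VERDICT (by name: the statement is the Claim_ definition above) =====
theorem find_option_index_py_spec : Claim_equal_find_option_index_py := by
  intro options value _ _
  unfold Spec_find_option_index_py find_option_index_py find_option_index_py_alt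
  rw [pvLoopB_eq]
  cases h : PySem.List.index? options value with
  | some j => simp
  | none => simp
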